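-- pv_equiv track=rewrite | github.com/yogan/advent-of-code | 2023/day-14/day14.py | tilt_line_east
-- ===== SOURCE A (Python) =====
-- def tilt_line_east(line):
--     new_line = []
--
--     dist = 0
--     rounded = 0
--     last_cube_idx = -1
--
--     for i in range(len(line)):
--         if line[i] == "#":
--             dots = i - rounded - last_cube_idx - 1
--             for d in range(dist):
--                 new_line.append("." if d < dots else "O")
--             new_line.append("#")
--
--             dist = 0
--             rounded = 0
--             last_cube_idx = i
--             continue
--
--         dist += 1
--         if line[i] == "O":
--             rounded += 1
--
--     dots = len(line) - rounded - last_cube_idx - 1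
--     for d in range(dist):
--         new_line.append("." if d < dots else "O")
--
--     return new_line
-- ===== SOURCE B (Python) =====
-- def tilt_line_east(line):
--     out = []
--     rest = line
--     while "#" in rest:
--         i = rest.index("#")
--         out += sorted("O" if c == "O" else "." for c in rest[:i])
--         out.append("#")
--         rest = rest[i + 1:]
--     out += sorted("O" if c == "O" else "." for c in rest)
--     return out
-- ===== Notes on version B (the rewrite author's own statement) =====
-- stated objective: alternative
-- what changed: Replaces A's single char-by-char pass with running counters (dist/rounded/last_cube_idx) by a staged approach: repeatedly locate the next '#' with index, slice out the segment, normalize each char to '.'/'O' and SORT the segment (since '.' < 'O' sorting pushes rocks east), joining segments with '#'.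
import Mathlib
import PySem

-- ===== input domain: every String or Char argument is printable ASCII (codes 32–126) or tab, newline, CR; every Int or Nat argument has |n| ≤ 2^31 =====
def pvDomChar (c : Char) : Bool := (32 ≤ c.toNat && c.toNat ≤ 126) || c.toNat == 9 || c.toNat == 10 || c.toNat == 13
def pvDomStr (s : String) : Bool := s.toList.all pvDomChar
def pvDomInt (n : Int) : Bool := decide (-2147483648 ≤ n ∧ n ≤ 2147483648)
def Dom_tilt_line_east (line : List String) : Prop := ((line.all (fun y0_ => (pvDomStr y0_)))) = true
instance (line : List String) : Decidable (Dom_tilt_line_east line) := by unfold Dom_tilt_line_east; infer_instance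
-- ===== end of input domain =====

-- B replaces A's counter-based single pass by index/slice segmentation plus sorting each normalized segment; objective: alternative.

-- ===== PORT A =====
-- inner loop: for d in range(dist): new_line.append("." if d < dots else "O")
def tiltA_emit (dots dist : Int) (nl : List String) : List String :=
  (PySem.List.pyRange 0 dist 1).foldl (fun acc d => acc ++ [if d < dots then "." else "O"]) nl

-- the main for-loop over i in range(len(line)), carrying i and A's state; the [] case is the final flush after the loop
def tiltA_go : List String → Int → List String → Int → Int → Int → List String
  | [], i, nl, dist, rounded, lc => tiltA_emit (i - rounded - lc - 1) dist nl
  | c :: rest, i, nl, dist, rounded, lc =>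
      if c = "#" then
        tiltA_go rest (i + 1) (tiltA_emit (i - rounded - lc - 1) dist nl ++ ["#"]) 0 0 i
      else
        tiltA_go rest (i + 1) nl (dist + 1) (if c = "O" then rounded + 1 else rounded) lc

def tilt_line_east (line : List String) : List String :=
  tiltA_go line 0 [] 0 0 (-1)

-- ===== PORT B =====
-- sorted("O" if c == "O" else "." for c in seg)
def sortSeg (seg : List String) : List String :=
  PySem.List.sorted (seg.map (fun c => if c = "O" then "O" else ".")) (fun x => x) false

-- the while loop: while "#" in rest: i = rest.index("#"); out += sorted(...); out.append("#"); rest = rest[i+1:]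
def tiltB_go (out rest : List String) : List String :=
  match h : PySem.List.index? rest "#" with
  | none => out ++ sortSeg rest
  | some i =>
      tiltB_go (out ++ sortSeg (PySem.List.slice rest none (some (i : Int))) ++ ["#"])
        (PySem.List.slice rest (some ((i : Int) + 1)) none)
termination_by rest.length
decreasing_by
  obtain ⟨hk, -, -⟩ := PySem.List.getElem_of_index?_eq_some h
  have : PySem.List.slice rest (some ((i : Int) + 1)) none = rest.drop (i + 1) := by
    have := PySem.List.slice_from_natCast (xs := rest) (a := i + 1)
    push_cast at this
    exact this
  rw [this]
  simp only [List.length_drop]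
  omega

def tilt_line_east_alt (line : List String) : List String :=
  tiltB_go [] line

-- ===== PRECONDITION & SPEC =====
def Spec_tilt_line_east (line : List String) (out : List String) : Prop := out = tilt_line_east_alt line
instance (line : List String) (out : List String) : Decidable (Spec_tilt_line_east line out) := by unfold Spec_tilt_line_east; infer_instance

-- ===== CLAIM (what is proved, stated in full; the proofs are below) =====
def Claim_equal_tilt_line_east : Prop := ∀ (line : List String), Dom_tilt_line_east line → Spec_tilt_line_east line (tilt_line_east line)

-- ===== LEMMAS AND PROOFS =====

-- dots then rocks: the canonical flushed form of a segment
def flushSeg (seg : List String) : List String :=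
  List.replicate (seg.length - seg.count "O") "." ++ List.replicate (seg.count "O") "O"

-- A's loop step, reformulated as a fold step used only in the proofs
def bstep (st : List String × List String) (c : String) : List String × List String :=
  if c = "#" then (st.1 ++ flushSeg st.2 ++ ["#"], []) else (st.1, st.2 ++ [c])

lemma rangeMap_eq (L r : Nat) (h : r ≤ L) :
    (List.range L).map (fun k : Nat => if (k : Int) < (L : Int) - (r : Int) then "." else "O")
      = List.replicate (L - r) "." ++ List.replicate r "O" := by
  obtain ⟨a, rfl⟩ : ∃ a, L = a + r := ⟨L - r, by omega⟩
  rw [List.range_add, List.map_append, List.map_map]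
  congr 1
  · have h1 : ∀ k ∈ List.range a,
        (if (k : Int) < ((a + r : Nat) : Int) - (r : Int) then "." else "O") = "." := by
      intro k hk
      rw [List.mem_range] at hk
      rw [if_pos]
      push_cast
      omega
    rw [List.map_congr_left h1, List.map_const', List.length_range]
    congr 1
    omega
  · have h2 : ∀ k ∈ List.range r,
        ((fun k : Nat => if (k : Int) < ((a + r : Nat) : Int) - (r : Int) then "." else "O") ∘
          (fun j => a + j)) k = "O" := by
      intro k hk
      simp only [Function.comp]
      rw [if_neg]
      push_cast
      omega
    rw [List.map_congr_left h2, List.map_const', List.length_range]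

lemma emit_flush (seg nl : List String) :
    tiltA_emit ((seg.length : Int) - (seg.count "O" : Int)) (seg.length : Int) nl
      = nl ++ flushSeg seg := by
  unfold tiltA_emit flushSeg
  rw [PySem.List.foldl_append_singleton_eq_map, PySem.List.pyRange_zero_nat, List.map_map]
  rw [show ((fun d : Int => if d < (seg.length : Int) - (seg.count "O" : Int) then "." else "O") ∘
        (fun k : Nat => (k : Int)))
      = (fun k : Nat => if (k : Int) < (seg.length : Int) - (seg.count "O" : Int) then "." else "O")
      from rfl]
  rw [rangeMap_eq seg.length (seg.count "O") (List.count_le_length)]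

lemma count_append_singleton (seg : List String) (c : String) :
    ((seg ++ [c]).count "O" : Int) = (seg.count "O" : Int) + (if c = "O" then 1 else 0) := by
  by_cases hO : c = "O" <;> simp [hO, List.count_append]

lemma go_eq (rest : List String) : ∀ (nl seg : List String) (lc : Int),
    tiltA_go rest (lc + 1 + (seg.length : Int)) nl (seg.length : Int) (seg.count "O" : Int) lc
      = (rest.foldl bstep (nl, seg)).1 ++ flushSeg (rest.foldl bstep (nl, seg)).2 := by
  induction rest with
  | nil =>
    intro nl seg lc
    show tiltA_emit _ _ _ = _
    rw [show lc + 1 + (seg.length : Int) - (seg.count "O" : Int) - lc - 1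
          = (seg.length : Int) - (seg.count "O" : Int) by ring]
    exact emit_flush seg nl
  | cons c rest ih =>
    intro nl seg lc
    by_cases hc : c = "#"
    · simp only [tiltA_go, hc, if_pos, List.foldl_cons, bstep]
      rw [show lc + 1 + (seg.length : Int) - (seg.count "O" : Int) - lc - 1
            = (seg.length : Int) - (seg.count "O" : Int) by ring]
      rw [emit_flush seg nl]
      have := ih (nl ++ flushSeg seg ++ ["#"]) [] (lc + 1 + (seg.length : Int))
      simpa using this
    · simp only [tiltA_go, hc, if_false, List.foldl_cons, bstep]
      have := ih nl (seg ++ [c]) lc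
      rw [count_append_singleton] at this
      simp only [List.length_append, List.length_singleton] at this
      push_cast at this
      rw [show lc + 1 + (seg.length : Int) + 1 = lc + 1 + ((seg.length : Int) + 1) by ring]
      by_cases hO : c = "O" <;> simp only [hO, if_true, if_false] at this ⊢ <;> exact this

-- the normalized segment is a permutation of dots-then-rocks
lemma perm_flush (seg : List String) :
    (seg.map (fun c => if c = "O" then "O" else ".")).Perm (flushSeg seg) := by
  induction seg with
  | nil => simp [flushSeg]
  | cons c seg ih =>
    have hle : seg.count "O" ≤ seg.length := List.count_le_length
    by_cases hO : c = "O"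
    · subst hO
      simp only [List.map_cons, if_pos]
      unfold flushSeg
      rw [show ("O" :: seg).count "O" = seg.count "O" + 1 by simp]
      rw [show ("O" :: seg).length - (seg.count "O" + 1) = seg.length - seg.count "O" by
            simp only [List.length_cons]; omega]
      rw [List.replicate_succ]
      exact (ih.cons "O").trans List.perm_middle.symm
    · simp only [List.map_cons, hO, if_false]
      unfold flushSeg
      rw [show (c :: seg).count "O" = seg.count "O" by simp [hO]]
      rw [show (c :: seg).length - seg.count "O" = (seg.length - seg.count "O") + 1 by
            simp only [List.length_cons]; omega]
      rw [List.replicate_succ]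
      exact ih.cons "."

lemma dot_le_O : ("." : String) ≤ "O" := le_of_lt (compare_gt_iff_gt.mp rfl)

lemma flush_pairwise (seg : List String) : (flushSeg seg).Pairwise (· ≤ ·) := by
  unfold flushSeg
  apply List.pairwise_append.2
  refine ⟨List.pairwise_replicate.2 (Or.inr le_rfl), List.pairwise_replicate.2 (Or.inr le_rfl), ?_⟩
  intro a ha b hb
  rw [List.eq_of_mem_replicate ha, List.eq_of_mem_replicate hb]
  exact dot_le_O

-- sorting the normalized segment yields the flushed segment
lemma sortSeg_eq_flush (seg : List String) : sortSeg seg = flushSeg seg :=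
  PySem.List.sorted_id_eq_of_perm_of_pairwise _ _ ((perm_flush seg).symm) (flush_pairwise seg)

lemma foldl_bstep_no_hash (l : List String) (h : "#" ∉ l) (nl seg : List String) :
    l.foldl bstep (nl, seg) = (nl, seg ++ l) := by
  induction l generalizing seg with
  | nil => simp
  | cons c l ih =>
    have hc : c ≠ "#" := fun hc => h (hc ▸ List.mem_cons_self)
    simp only [List.foldl_cons, bstep, if_neg (fun hh => hc hh)]
    rw [ih (fun hm => h (List.mem_cons_of_mem _ hm)) (seg ++ [c])]
    simp

lemma foldl_bstep_prefix (l : List String) (nl seg : List String) :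
    l.foldl bstep (nl, seg)
      = (nl ++ (l.foldl bstep ([], seg)).1, (l.foldl bstep ([], seg)).2) := by
  induction l generalizing nl seg with
  | nil => simp
  | cons c l ih =>
    by_cases hc : c = "#"
    · simp only [List.foldl_cons, bstep, hc, if_pos]
      rw [ih (nl ++ flushSeg seg ++ ["#"]) []]
      simp only [List.nil_append]
      rw [ih (flushSeg seg ++ ["#"]) []]
      simp
    · simp only [List.foldl_cons, bstep, if_neg hc]
      exact ih nl (seg ++ [c])

-- canonical value both programs compute
def F (l : List String) : List String :=
  (l.foldl bstep ([], [])).1 ++ flushSeg (l.foldl bstep ([], [])).2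

lemma tiltB_go_eq (n : Nat) : ∀ (rest : List String), rest.length ≤ n →
    ∀ (out : List String), tiltB_go out rest = out ++ F rest := by
  induction n with
  | zero =>
    intro rest hlen out
    have : rest = [] := List.eq_nil_of_length_eq_zero (by omega)
    subst this
    rw [tiltB_go]
    simp [F, flushSeg, sortSeg, PySem.List.sorted]
  | succ n ih =>
    intro rest hlen out
    rw [tiltB_go]
    split
    · next h =>
      have hnot : "#" ∉ rest := (PySem.List.index?_eq_none_iff _ _).1 h
      rw [sortSeg_eq_flush]
      unfold F
      rw [foldl_bstep_no_hash rest hnot]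
      simp
    · next i h =>
      obtain ⟨pre, suf, hsplit, hplen, hpre⟩ := (PySem.List.index?_eq_some_iff _ _ _).1 h
      have hslice1 : PySem.List.slice rest none (some (i : Int)) = pre := by
        rw [PySem.List.slice_to_natCast, hsplit, ← hplen, List.take_left]
      have hslice2 : PySem.List.slice rest (some ((i : Int) + 1)) none = suf := by
        have hc := PySem.List.slice_from_natCast (xs := rest) (a := i + 1)
        push_cast at hc
        rw [hc, hsplit, ← hplen, List.drop_append]
        simp
      rw [hslice1, hslice2, sortSeg_eq_flush]
      have hsuf : suf.length ≤ n := by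
        subst hsplit
        simp at hlen
        omega
      rw [ih suf hsuf]
      unfold F
      rw [hsplit, List.foldl_append, foldl_bstep_no_hash pre hpre, List.foldl_cons]
      rw [show bstep (([] : List String), [] ++ pre) "#" = (flushSeg pre ++ ["#"], []) by
            simp [bstep]]
      rw [foldl_bstep_prefix suf (flushSeg pre ++ ["#"]) []]
      simp

-- ===== VERDICT (by name: the statement is the Claim_ definition above) =====
theorem tilt_line_east_spec : Claim_equal_tilt_line_east := by
  intro line _
  show tilt_line_east line = tilt_line_east_alt line
  unfold tilt_line_east tilt_line_east_alt
  rw [tiltB_go_eq line.length line le_rfl []]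
  have := go_eq line [] [] (-1)
  simpa [F] using this
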